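-- pv_equiv track=rewrite | github.com/Vimal-Mahendran/DAA-Assignment | Assignment-6/10.Count Subarrays With Median K.py | count_subarrays_with_median_k
-- ===== SOURCE A (Python) =====
-- def count_subarrays_with_median_k(nums, k):
--     count = 0
--     for i in range(len(nums)):
--         for j in range(i, len(nums)):
--             subarray = nums[i:j+1]
--             if len(subarray) % 2 == 1 and sorted(subarray)[len(subarray)//2] == k:
--                 count += 1
--             elif len(subarray) % 2 == 0 and sorted(subarray)[len(subarray)//2 - 1] == k:
--                 count += 1
--     return count
-- ===== SOURCE B (Python) =====
-- def count_subarrays_with_median_k(nums, k):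
--     # For each start i, sweep j rightwards keeping counts of elements < k and == k;
--     # the (lower) median of nums[i:j+1] equals k iff less <= (j-i)//2 < less+equal.
--     n = len(nums)
--     total = 0
--     for i in range(n):
--         less = 0
--         equal = 0
--         for j in range(i, n):
--             x = nums[j]
--             if x < k:
--                 less += 1
--             elif x == k:
--                 equal += 1
--             m = (j - i) // 2
--             if less <= m and m < less + equal:
--                 total += 1
--     return total
-- ===== Notes on version B (the rewrite author's own statement) =====
-- stated objective: faster
-- what changed: Replaces slicing and sorting every subarray with a per-start incremental sweep that maintains counts of elements < k and == k and tests the lower-median index condition directly.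
import Mathlib
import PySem

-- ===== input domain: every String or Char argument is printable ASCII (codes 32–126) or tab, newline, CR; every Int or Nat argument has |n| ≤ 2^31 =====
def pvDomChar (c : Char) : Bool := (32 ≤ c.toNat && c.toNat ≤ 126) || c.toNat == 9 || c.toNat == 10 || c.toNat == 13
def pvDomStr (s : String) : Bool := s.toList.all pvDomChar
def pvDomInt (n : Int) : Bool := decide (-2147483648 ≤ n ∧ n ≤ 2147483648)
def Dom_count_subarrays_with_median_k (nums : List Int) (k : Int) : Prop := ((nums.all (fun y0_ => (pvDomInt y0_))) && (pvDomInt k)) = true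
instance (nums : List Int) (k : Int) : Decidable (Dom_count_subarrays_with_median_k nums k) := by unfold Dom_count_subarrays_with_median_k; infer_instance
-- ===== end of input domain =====

-- B replaces per-subarray slicing+sorting with an incremental less/equal count sweep: asymptotically faster (O(n^2) vs O(n^3 log n)).

-- ===== PORT A =====
-- inner loop 'for j in range(i, len(nums)): …' of A, transliterated step for step
def pvAInner (nums : List Int) (k : Int) (i : Int) (count : Int) : Int :=
  (PySem.List.pyRange i (nums.length : Int) 1).foldl (fun count j =>
    let subarray := PySem.List.slice nums (some i) (some (j + 1))
    if (subarray.length % 2 == 1) &&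
       (PySem.List.pyGet? (PySem.List.sorted subarray (fun x => x) false)
          (PySem.Int.floordiv (subarray.length : Int) 2) == some k) then
      count + 1
    else if (subarray.length % 2 == 0) &&
       (PySem.List.pyGet? (PySem.List.sorted subarray (fun x => x) false)
          (PySem.Int.floordiv (subarray.length : Int) 2 - 1) == some k) then
      count + 1
    else count) count

def count_subarrays_with_median_k (nums : List Int) (k : Int) : Int :=
  (PySem.List.pyRange 0 (nums.length : Int) 1).foldl
    (fun count i => pvAInner nums k i count) 0

-- ===== PORT B =====
-- inner loop of B: state (less, equal, total); x = nums[j] is always in range here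
def pvBInner (nums : List Int) (k : Int) (i : Int) (st : Int × Int × Int) : Int × Int × Int :=
  (PySem.List.pyRange i (nums.length : Int) 1).foldl (fun st j =>
    let x := PySem.List.pyGetD nums j 0
    let less := if x < k then st.1 + 1 else st.1
    let equal := if ¬ x < k ∧ x = k then st.2.1 + 1 else st.2.1
    let m := PySem.Int.floordiv (j - i) 2
    (less, equal, if less ≤ m ∧ m < less + equal then st.2.2 + 1 else st.2.2)) st

def count_subarrays_with_median_k_alt (nums : List Int) (k : Int) : Int :=
  (PySem.List.pyRange 0 (nums.length : Int) 1).foldl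
    (fun total i => (pvBInner nums k i (0, 0, total)).2.2) 0

-- ===== PRECONDITION & SPEC =====
def Spec_count_subarrays_with_median_k (nums : List Int) (k : Int) (out : Int) : Prop := out = count_subarrays_with_median_k_alt nums k
instance (nums : List Int) (k : Int) (out : Int) : Decidable (Spec_count_subarrays_with_median_k nums k out) := by unfold Spec_count_subarrays_with_median_k; infer_instance

-- ===== CLAIM (what is proved, stated in full; the proofs are below) =====
def Claim_equal_count_subarrays_with_median_k : Prop := ∀ (nums : List Int) (k : Int), Dom_count_subarrays_with_median_k nums k → Spec_count_subarrays_with_median_k nums k (count_subarrays_with_median_k nums k)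

-- ===== LEMMAS AND PROOFS =====


lemma sorted_pred_iff_lt_countP (p : Int → Bool)
    (hp : ∀ a b : Int, a ≤ b → p b = true → p a = true) :
    ∀ (t : List Int), t.Pairwise (· ≤ ·) → ∀ (m : Nat) (hm : m < t.length),
      (p t[m] = true ↔ m < t.countP p) := by
  intro t
  induction t with
  | nil => intro _ m hm; simp at hm
  | cons x rest ih =>
    intro hpw m hm
    rw [List.pairwise_cons] at hpw
    obtain ⟨hx, hrest⟩ := hpw
    have hzero : p x = false → rest.countP p = 0 := by
      intro hpx
      rw [List.countP_eq_zero]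
      intro y hy hpy
      have := hp x y (hx y hy) hpy
      simp [hpx] at this
    cases m with
    | zero =>
      simp only [List.getElem_cons_zero, List.countP_cons]
      constructor
      · intro h; simp [h]
      · intro h
        by_contra hpx
        rw [Bool.not_eq_true] at hpx
        rw [hzero hpx, hpx] at h
        simp at h
    | succ m' =>
      simp only [List.getElem_cons_succ, List.countP_cons]
      rw [ih hrest m' (by simpa using hm)]
      by_cases hpx : p x = true
      · simp [hpx]
      · rw [Bool.not_eq_true] at hpx
        rw [hzero hpx, hpx]
        simp

lemma countP_le_split (k : Int) (t : List Int) :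
    t.countP (fun x => decide (x ≤ k)) =
      t.countP (fun x => decide (x < k)) + t.count k := by
  induction t with
  | nil => simp
  | cons x rest ih =>
    simp only [List.countP_cons, List.count_cons, ih]
    rcases lt_trichotomy x k with h | h | h
    · simp [h, le_of_lt h, ne_of_lt h]; omega
    · subst h; simp; omega
    · simp [not_lt.mpr (le_of_lt h), not_le.mpr h, ne_of_gt h]

lemma median_char (k : Int) (t s : List Int) (hperm : t.Perm s)
    (hpw : t.Pairwise (· ≤ ·)) (m : Nat) (hm : m < t.length) :
    (t[m] = k ↔
      (s.countP (fun x => decide (x < k)) ≤ m ∧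
        m < s.countP (fun x => decide (x < k)) + s.count k)) := by
  have h1 := sorted_pred_iff_lt_countP (fun x => decide (x < k))
    (by intro a b hab h; simp only [decide_eq_true_eq] at *; omega) t hpw m hm
  have h2 := sorted_pred_iff_lt_countP (fun x => decide (x ≤ k))
    (by intro a b hab h; simp only [decide_eq_true_eq] at *; omega) t hpw m hm
  simp only [decide_eq_true_eq] at h1 h2
  have hsplit := countP_le_split k t
  have hc1 : t.countP (fun x => decide (x < k)) = s.countP (fun x => decide (x < k)) :=
    hperm.countP_eq _
  have hc2 : t.countP (fun x => decide (x ≤ k)) = s.countP (fun x => decide (x ≤ k)) :=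
    hperm.countP_eq _
  have hcnt : t.count k = s.count k := hperm.count_eq k
  constructor
  · intro h
    have ha : m < t.countP (fun x => decide (x ≤ k)) := h2.mp (by omega)
    have hb : ¬ m < t.countP (fun x => decide (x < k)) := by
      intro hc; have := h1.mpr hc; omega
    omega
  · intro ⟨ha, hb⟩
    have h3 : t[m] ≤ k := h2.mpr (by omega)
    have h4 : ¬ t[m] < k := by
      intro hc; have := h1.mp hc; omega
    omega

lemma sorted_median_iff (k : Int) (s : List Int) (m : Nat)
    (hm : m < (PySem.List.sorted s (fun x => x) false).length) :
    ((PySem.List.sorted s (fun x => x) false)[m] = k ↔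
      (s.countP (fun x => decide (x < k)) ≤ m ∧
        m < s.countP (fun x => decide (x < k)) + s.count k)) :=
  median_char k _ s (PySem.List.sorted_perm s (fun x => x) false)
    (PySem.List.sorted_pairwise s (fun x => x)) m hm

lemma A_step_eq (k : Int) (s : List Int) (hs : s ≠ []) (c : Int) :
    (if (s.length % 2 == 1) &&
        (PySem.List.pyGet? (PySem.List.sorted s (fun x => x) false)
           (PySem.Int.floordiv (s.length : Int) 2) == some k) then c + 1
     else if (s.length % 2 == 0) &&
        (PySem.List.pyGet? (PySem.List.sorted s (fun x => x) false)
           (PySem.Int.floordiv (s.length : Int) 2 - 1) == some k) then c + 1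
     else c)
    = (if (s.countP (fun x => decide (x < k)) ≤ (s.length - 1) / 2 ∧
           (s.length - 1) / 2 < s.countP (fun x => decide (x < k)) + s.count k)
       then c + 1 else c) := by
  have hlen : 0 < s.length := List.length_pos_iff.mpr hs
  have hmlt : (s.length - 1) / 2 < (PySem.List.sorted s (fun x => x) false).length := by
    rw [PySem.List.length_sorted]; omega
  have hmed := sorted_median_iff k s ((s.length - 1) / 2) hmlt
  by_cases hodd : s.length % 2 = 1
  · have hfd : PySem.Int.floordiv (s.length : Int) 2 = (((s.length - 1) / 2 : Nat) : Int) := by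
      rw [PySem.Int.floordiv_eq_ediv_of_pos (by norm_num)]; omega
    rw [hfd, PySem.List.pyGet?_natCast, List.getElem?_eq_getElem hmlt]
    simp only [hodd, Option.some_beq_some]
    simp only [show ((1:Nat) == 1) = true from rfl, show ((1:Nat) == 0) = false from rfl,
      Bool.true_and, Bool.false_and, beq_iff_eq, Bool.false_eq_true, if_false]
    exact if_congr hmed rfl rfl
  · have heven : s.length % 2 = 0 := by omega
    have hfd : PySem.Int.floordiv (s.length : Int) 2 - 1 = (((s.length - 1) / 2 : Nat) : Int) := by
      rw [PySem.Int.floordiv_eq_ediv_of_pos (by norm_num)]; omega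
    rw [hfd, PySem.List.pyGet?_natCast, List.getElem?_eq_getElem hmlt]
    have h1 : (s.length % 2 == 1) = false := by simp [heven]
    have h2 : (s.length % 2 == 0) = true := by simp [heven]
    simp only [h1, h2, Bool.false_and, Bool.true_and, Option.some_beq_some, beq_iff_eq,
      if_neg (by simp : ¬ (false = true))]
    exact if_congr hmed rfl rfl

lemma inner_eq (nums : List Int) (k : Int) (i : Nat) :
    ∀ (d j : Nat), i ≤ j → j + d = nums.length →
    ∀ (less equal c : Int),
      less = (((nums.drop i).take (j - i)).countP (fun x => decide (x < k)) : Int) →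
      equal = (((nums.drop i).take (j - i)).count k : Int) →
      ((PySem.List.pyRange (j : Int) (nums.length : Int) 1).foldl (fun st jj =>
          let x := PySem.List.pyGetD nums jj 0
          let less := if x < k then st.1 + 1 else st.1
          let equal := if ¬ x < k ∧ x = k then st.2.1 + 1 else st.2.1
          let m := PySem.Int.floordiv (jj - (i : Int)) 2
          (less, equal, if less ≤ m ∧ m < less + equal then st.2.2 + 1 else st.2.2))
        (less, equal, c)).2.2
      = (PySem.List.pyRange (j : Int) (nums.length : Int) 1).foldl (fun count jj =>
          let subarray := PySem.List.slice nums (some (i : Int)) (some (jj + 1))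
          if (subarray.length % 2 == 1) &&
             (PySem.List.pyGet? (PySem.List.sorted subarray (fun x => x) false)
                (PySem.Int.floordiv (subarray.length : Int) 2) == some k) then
            count + 1
          else if (subarray.length % 2 == 0) &&
             (PySem.List.pyGet? (PySem.List.sorted subarray (fun x => x) false)
                (PySem.Int.floordiv (subarray.length : Int) 2 - 1) == some k) then
            count + 1
          else count) c := by
  intro d
  induction d with
  | zero =>
    intro j hij hlen less equal c hless hequal
    rw [PySem.List.pyRange_one_eq_nil (by omega)]
    simp [List.foldl_nil]
  | succ d ih =>
    intro j hij hlen less equal c hless hequal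
    have hj : j < nums.length := by omega
    rw [PySem.List.pyRange_one_cons (by exact_mod_cast hj)]
    simp only [List.foldl_cons]
    -- the element read at j
    have hx : PySem.List.pyGetD nums (j : Int) 0 = nums[j] := by
      rw [PySem.List.pyGetD_natCast, List.getD_eq_getElem _ _ hj]
    -- the new subarray is the old one with nums[j] appended
    have htake : (nums.drop i).take (j + 1 - i) = (nums.drop i).take (j - i) ++ [nums[j]] := by
      have h1 : j + 1 - i = (j - i) + 1 := by omega
      rw [h1, List.take_add_one]
      have h2 : (nums.drop i)[j - i]? = some nums[j] := by
        rw [List.getElem?_drop]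
        have h3 : i + (j - i) = j := by omega
        rw [h3, List.getElem?_eq_getElem hj]
      rw [h2]
      rfl
    -- the slice A computes at jj = j
    have hslice : PySem.List.slice nums (some (i : Int)) (some ((j : Int) + 1)) =
        (nums.drop i).take (j + 1 - i) := by
      have : ((j : Int) + 1) = ((j + 1 : Nat) : Int) := by push_cast; ring
      rw [this, PySem.List.slice_natCast]
    -- the midpoint
    have hm : PySem.Int.floordiv ((j : Int) - (i : Int)) 2 = (((j - i) / 2 : Nat) : Int) := by
      rw [PySem.Int.floordiv_eq_ediv_of_pos (by norm_num)]; omega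
    -- rewrite the A-side step with A_step_eq
    rw [hslice, A_step_eq k _ (by
      intro hc
      have := congrArg List.length hc
      simp [List.length_take, List.length_drop] at this
      omega) c]
    -- new counts
    have hlen' : ((nums.drop i).take (j + 1 - i)).length = j + 1 - i := by
      simp [List.length_take, List.length_drop]; omega
    -- compare conditions and apply ih
    have happ := htake
    have hcount : (((nums.drop i).take (j + 1 - i)).countP (fun x => decide (x < k))) =
        ((nums.drop i).take (j - i)).countP (fun x => decide (x < k)) +
          (if nums[j] < k then 1 else 0) := by
      rw [happ, List.countP_append]
      by_cases h : nums[j] < k <;> simp [h]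
    have hcnt2 : (((nums.drop i).take (j + 1 - i)).count k) =
        ((nums.drop i).take (j - i)).count k + (if nums[j] = k then 1 else 0) := by
      rw [happ, List.count_append]
      by_cases h : nums[j] = k <;> simp [h]
    have hless' : (if nums[j] < k then less + 1 else less) =
        ((((nums.drop i).take (j + 1 - i)).countP (fun x => decide (x < k)) : Nat) : Int) := by
      rw [hcount]; push_cast [hless]; split_ifs <;> omega
    have hequal' : (if ¬ nums[j] < k ∧ nums[j] = k then equal + 1 else equal) =
        ((((nums.drop i).take (j + 1 - i)).count k : Nat) : Int) := by
      rw [hcnt2]; push_cast [hequal]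
      by_cases h1 : nums[j] = k
      · simp [h1]
      · simp [h1]
    have hmlen : (j + 1 - i - 1) / 2 = (j - i) / 2 := by omega
    simp only [hx, hm, hlen', hmlen]
    have hcondiff : ((if nums[j] < k then less + 1 else less) ≤ (((j - i) / 2 : Nat) : Int) ∧
          (((j - i) / 2 : Nat) : Int) < (if nums[j] < k then less + 1 else less) +
            (if ¬ nums[j] < k ∧ nums[j] = k then equal + 1 else equal)) ↔
        (((nums.drop i).take (j + 1 - i)).countP (fun x => decide (x < k)) ≤ (j - i) / 2 ∧
          (j - i) / 2 < ((nums.drop i).take (j + 1 - i)).countP (fun x => decide (x < k)) +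
            ((nums.drop i).take (j + 1 - i)).count k) := by
      rw [hless', hequal']; omega
    rw [if_congr hcondiff rfl rfl]
    exact ih (j + 1) (by omega) (by omega) _ _ _ hless' hequal'

-- for each start index i, B's inner sweep returns what A's inner loop returns
lemma per_start (nums : List Int) (k : Int) (i : Nat) (hi : i ≤ nums.length) (c : Int) :
    pvAInner nums k (i : Int) c = (pvBInner nums k (i : Int) (0, 0, c)).2.2 := by
  unfold pvAInner pvBInner
  exact (inner_eq nums k i (nums.length - i) i (le_refl i) (by omega) 0 0 c
    (by simp) (by simp)).symm

-- ===== VERDICT (by name: the statement is the Claim_ definition above) =====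
theorem count_subarrays_with_median_k_spec : Claim_equal_count_subarrays_with_median_k := by
  intro nums k _
  unfold Spec_count_subarrays_with_median_k
  unfold count_subarrays_with_median_k count_subarrays_with_median_k_alt
  apply PySem.List.foldl_congr_mem
  intro acc x hx
  rw [PySem.List.mem_pyRange_one] at hx
  obtain ⟨n, rfl⟩ := Int.eq_ofNat_of_zero_le hx.1
  exact per_start nums k n (by exact_mod_cast le_of_lt hx.2) acc
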